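-- pv_equiv track=rewrite | github.com/WXjzcccc/WXjzc-tool | levelTree/levelTree.py | calculate_subordinate_info
-- ===== SOURCE A (Python) =====
-- def calculate_subordinate_info(user_tree, user_id):
--     '''计算下线数量和下线层级'''
--     if user_id not in user_tree:
--         return 0, 0  # 如果没有下线，层数和数量都是0
--
--     max_depth = 0
--     total_subordinates = 0
--
--     for sub_id in user_tree[user_id]:
--         sub_count, sub_depth = calculate_subordinate_info(user_tree, sub_id)
--         total_subordinates += sub_count + 1  # 加1是因为直接下线也要算
--         max_depth = max(max_depth, sub_depth + 1)
--
--     return total_subordinates, max_depth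
-- ===== SOURCE B (Python) =====
-- def calculate_subordinate_info(user_tree, user_id):
--     '''计算下线数量和下线层级 -- iterative level-by-level (BFS) version'''
--     if user_id not in user_tree:
--         return 0, 0
--     total = 0
--     depth = 0
--     frontier = [user_id]
--     # any acyclic chain of keys has at most len(user_tree) edges, so this bound is never hit on valid data
--     for _ in range(len(user_tree) + 1):
--         nxt = [c for u in frontier for c in user_tree.get(u, [])]
--         if not nxt:
--             break
--         total += len(nxt)
--         depth += 1
--         frontier = nxt
--     return total, depth
-- ===== Notes on version B (the rewrite author's own statement) =====
-- stated objective: alternative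
-- what changed: A's per-node recursion is replaced by an iterative level-by-level (BFS) walk over whole frontiers: the count is the sum of the sizes of successive frontiers and the depth is the number of non-empty rounds, so no call stack and no per-node tuple arithmetic remain.
import Mathlib
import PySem

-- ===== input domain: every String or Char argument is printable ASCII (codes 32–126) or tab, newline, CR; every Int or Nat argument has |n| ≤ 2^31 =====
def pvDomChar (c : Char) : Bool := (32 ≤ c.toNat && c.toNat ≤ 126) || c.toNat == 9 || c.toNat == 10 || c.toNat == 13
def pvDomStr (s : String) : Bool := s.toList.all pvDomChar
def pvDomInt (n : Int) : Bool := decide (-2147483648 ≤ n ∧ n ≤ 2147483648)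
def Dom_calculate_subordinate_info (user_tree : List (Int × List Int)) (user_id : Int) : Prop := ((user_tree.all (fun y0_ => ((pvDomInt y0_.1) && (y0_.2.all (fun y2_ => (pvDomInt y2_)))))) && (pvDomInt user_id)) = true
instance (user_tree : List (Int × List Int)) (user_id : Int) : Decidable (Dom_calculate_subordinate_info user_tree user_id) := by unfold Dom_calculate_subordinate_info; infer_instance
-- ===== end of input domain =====

-- B replaces A's recursion by an iterative level-by-level (BFS) walk that adds up frontier
-- sizes for the count and counts rounds for the depth (objective: alternative decomposition).


-- first-match lookup in the association list (= Python dict lookup; dict keys are unique)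
def pvGetKey : List (Int × List Int) → Int → Option (List Int)
  | [], _ => none
  | (k, v) :: r, u => if k = u then some v else pvGetKey r u

-- ===== PORT A =====
-- A's recursion, with a fuel of user_tree.length + 1: inside Pre_ (no cycle reachable from
-- user_id) every call chain visits distinct keys, so its depth is ≤ length + 1 and the
-- fuel-0 branch is never taken; the fuel only makes the Lean function total.
def pvGoA (t : List (Int × List Int)) (fuel : Nat) (u : Int) : Int × Int :=
  match pvGetKey t u with
  | none => (0, 0)                      -- if user_id not in user_tree: return 0, 0
  | some ch =>
    match fuel with
    | 0 => (0, 0)                       -- unreachable inside Pre_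
    | n + 1 =>
      -- for sub_id in user_tree[user_id]: total += sub_count + 1; max_depth = max(max_depth, sub_depth + 1)
      ch.foldl (fun (acc : Int × Int) c =>
        let r := pvGoA t n c
        (acc.1 + (r.1 + 1), max acc.2 (r.2 + 1))) ((0 : Int), (0 : Int))
termination_by fuel

def calculate_subordinate_info (user_tree : List (Int × List Int)) (user_id : Int) : Int × Int :=
  pvGoA user_tree (user_tree.length + 1) user_id

-- ===== PORT B =====
-- the bounded for-loop of Source B: fuel = number of remaining rounds
def pvGoB (t : List (Int × List Int)) (fuel : Nat) (frontier : List Int) (total depth : Int) : Int × Int :=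
  match fuel with
  | 0 => (total, depth)
  | n + 1 =>
    let nxt := frontier.flatMap (fun u => (pvGetKey t u).getD [])
    if nxt.isEmpty then (total, depth)
    else pvGoB t n nxt (total + nxt.length) (depth + 1)

def calculate_subordinate_info_alt (user_tree : List (Int × List Int)) (user_id : Int) : Int × Int :=
  if (pvGetKey user_tree user_id).isSome then
    pvGoB user_tree (user_tree.length + 1) [user_id] 0 0
  else (0, 0)

-- ===== PRECONDITION & SPEC =====
-- children edges of the input graph, written with the library lookup (independent of the ports)
def pvChP (t : List (Int × List Int)) (u : Int) : List Int := (t.lookup u).getD []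
def pvStepP (t : List (Int × List Int)) (S : List Int) : List Int :=
  (S ++ S.flatMap (pvChP t)).dedup
-- the set of ids reachable from S (length+1 rounds reach the fixpoint: new ids only arise from keys)
def pvReach (t : List (Int × List Int)) (S : List Int) : List Int :=
  (pvStepP t)^[t.length + 1] S

-- Pre_ excludes exactly the inputs on which A raises (RecursionError: some key on a cycle is
-- reachable from user_id, so A's recursion never terminates); A returns on every other input.
def Pre_calculate_subordinate_info (user_tree : List (Int × List Int)) (user_id : Int) : Prop :=
  ∀ k ∈ user_tree.map Prod.fst,
    k ∈ pvReach user_tree [user_id] → k ∉ pvReach user_tree (pvChP user_tree k)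
instance (user_tree : List (Int × List Int)) (user_id : Int) : Decidable (Pre_calculate_subordinate_info user_tree user_id) := by
  unfold Pre_calculate_subordinate_info; infer_instance

def pvWitness_calculate_subordinate_info : (List (Int × List Int)) × Int :=
  ([(1, [2, 3]), (2, [3])], 1)

def Spec_calculate_subordinate_info (user_tree : List (Int × List Int)) (user_id : Int) (out : Int × Int) : Prop := out = calculate_subordinate_info_alt user_tree user_id
instance (user_tree : List (Int × List Int)) (user_id : Int) (out : Int × Int) : Decidable (Spec_calculate_subordinate_info user_tree user_id out) := by unfold Spec_calculate_subordinate_info; infer_instance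

-- ===== CLAIM (what is proved, stated in full; the proofs are below) =====
def Claim_equal_calculate_subordinate_info : Prop := ∀ (user_tree : List (Int × List Int)) (user_id : Int), Dom_calculate_subordinate_info user_tree user_id → Pre_calculate_subordinate_info user_tree user_id → Spec_calculate_subordinate_info user_tree user_id (calculate_subordinate_info user_tree user_id)

-- ===== LEMMAS AND PROOFS =====

-- proof-side abbreviation for a node's child list as the ports read it
def pvCh (t : List (Int × List Int)) (u : Int) : List Int := (pvGetKey t u).getD []

lemma pv_goA_zero (t : List (Int × List Int)) (u : Int) : pvGoA t 0 u = (0, 0) := by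
  unfold pvGoA; cases pvGetKey t u <;> simp

lemma pv_foldl_max_init (l : List Int) : ∀ a b : Int,
    l.foldl max (max a b) = max a (l.foldl max b) := by
  induction l with
  | nil => intro a b; simp
  | cons x r ih =>
    intro a b
    simp only [List.foldl_cons]
    rw [max_assoc, ih]

lemma pv_le_foldl_max (l : List Int) : ∀ b : Int, b ≤ l.foldl max b := by
  induction l with
  | nil => intro b; simp
  | cons x r ih => intro b; exact le_trans (le_max_left b x) (ih _)

lemma pv_foldl_max_zero_nonneg (l : List Int) : 0 ≤ l.foldl max 0 := pv_le_foldl_max l 0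

lemma pv_foldA_char (t : List (Int × List Int)) (n : Nat) (ch : List Int) : ∀ a b : Int,
    ch.foldl (fun (acc : Int × Int) c =>
      let r := pvGoA t n c
      (acc.1 + (r.1 + 1), max acc.2 (r.2 + 1))) (a, b)
    = (a + (ch.map (fun c => (pvGoA t n c).1 + 1)).sum,
       (ch.map (fun c => (pvGoA t n c).2 + 1)).foldl max b) := by
  induction ch with
  | nil => intro a b; simp
  | cons x r ih =>
    intro a b
    simp only [List.foldl_cons, List.map_cons, List.sum_cons]
    rw [ih]
    simp [Prod.ext_iff]; ring

lemma pv_goA_succ (t : List (Int × List Int)) (n : Nat) (u : Int) :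
    pvGoA t (n + 1) u = (((pvCh t u).map (fun c => (pvGoA t n c).1 + 1)).sum,
      ((pvCh t u).map (fun c => (pvGoA t n c).2 + 1)).foldl max 0) := by
  conv_lhs => rw [pvGoA]
  cases h : pvGetKey t u with
  | none => simp [pvCh, h]
  | some ch =>
    simp only [pvCh, h, Option.getD_some]
    rw [pv_foldA_char]
    simp

lemma pv_goA_succ_fst (t : List (Int × List Int)) (n : Nat) (u : Int) :
    (pvGoA t (n + 1) u).1 = ((pvCh t u).map (fun c => (pvGoA t n c).1 + 1)).sum := by
  rw [pv_goA_succ]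

lemma pv_goA_succ_snd (t : List (Int × List Int)) (n : Nat) (u : Int) :
    (pvGoA t (n + 1) u).2 = ((pvCh t u).map (fun c => (pvGoA t n c).2 + 1)).foldl max 0 := by
  rw [pv_goA_succ]

lemma pv_goA_snd_nonneg (t : List (Int × List Int)) : ∀ (fuel : Nat) (u : Int),
    0 ≤ (pvGoA t fuel u).2 := by
  intro fuel
  cases fuel with
  | zero => intro u; simp [pv_goA_zero]
  | succ n => intro u; rw [pv_goA_succ_snd]; exact pv_foldl_max_zero_nonneg _

lemma pv_sum_flatMap {α β : Type} (g : α → List β) (f : β → Int) : ∀ F : List α,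
    ((F.flatMap g).map f).sum = (F.map (fun u => ((g u).map f).sum)).sum := by
  intro F
  induction F with
  | nil => simp
  | cons u r ih => simp [List.flatMap_cons, ih]

lemma pv_foldl_max_absorb (l : List Int) (a : Int) (ha : 0 ≤ a) :
    l.foldl max a = max a (l.foldl max 0) := by
  conv_lhs => rw [← max_eq_left ha]
  exact pv_foldl_max_init l a 0

lemma pv_max_flatMap {α β : Type} (g : α → List β) (f : β → Int) : ∀ F : List α,
    ((F.flatMap g).map f).foldl max 0
      = (F.map (fun u => ((g u).map f).foldl max 0)).foldl max 0 := by
  intro F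
  induction F with
  | nil => simp
  | cons u r ih =>
    simp only [List.flatMap_cons, List.map_cons, List.map_append, List.foldl_cons,
      List.foldl_append]
    have h0 : (0 : Int) ≤ ((g u).map f).foldl max 0 := pv_foldl_max_zero_nonneg _
    rw [pv_foldl_max_absorb _ _ h0, ih, max_comm (0 : Int) _, max_eq_left h0,
      pv_foldl_max_absorb _ _ h0]

lemma pv_foldl_max_map_const_zero {α : Type} (F : List α) :
    (F.map (fun _ => (0 : Int))).foldl max 0 = 0 := by
  induction F with
  | nil => simp
  | cons x r ih => simpa using ih

lemma pv_sum_map_add_one (l : List Int) (f : Int → Int) :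
    (l.map (fun x => f x + 1)).sum = (l.map f).sum + l.length := by
  induction l with
  | nil => simp
  | cons x r ih => simp [ih]; ring

lemma pv_foldl_max_shift (l : List Int) : ∀ a : Int,
    (l.map (fun x => x + 1)).foldl max (a + 1) = l.foldl max a + 1 := by
  induction l with
  | nil => intro a; simp
  | cons x r ih =>
    intro a
    simp only [List.map_cons, List.foldl_cons]
    have : max (a + 1) (x + 1) = max a x + 1 := by omega
    rw [this, ih]

lemma pv_foldl_max_succ (l : List Int) (hne : l ≠ []) (hpos : ∀ x ∈ l, 0 ≤ x) :
    (l.map (fun x => x + 1)).foldl max 0 = l.foldl max 0 + 1 := by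
  cases l with
  | nil => exact absurd rfl hne
  | cons x r =>
    simp only [List.map_cons, List.foldl_cons]
    have hx : 0 ≤ x := hpos x (List.mem_cons_self ..)
    have h1 : max (0 : Int) (x + 1) = max 0 x + 1 := by omega
    rw [h1, pv_foldl_max_shift]

-- the main invariant: B's loop computes, for a whole frontier, the sum of A's counts and the
-- max of A's depths, truncated at the same fuel
lemma pv_goB_eq (t : List (Int × List Int)) : ∀ (fuel : Nat) (F : List Int) (total depth : Int),
    pvGoB t fuel F total depth =
      (total + (F.map (fun u => (pvGoA t fuel u).1)).sum,
       depth + (F.map (fun u => (pvGoA t fuel u).2)).foldl max 0) := by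
  intro fuel
  induction fuel with
  | zero =>
    intro F total depth
    have hz1 : F.map (fun u => (pvGoA t 0 u).1) = F.map (fun _ => (0 : Int)) :=
      List.map_congr_left (fun u _ => by rw [pv_goA_zero])
    have hz2 : F.map (fun u => (pvGoA t 0 u).2) = F.map (fun _ => (0 : Int)) :=
      List.map_congr_left (fun u _ => by rw [pv_goA_zero])
    rw [show pvGoB t 0 F total depth = (total, depth) from rfl, hz1, hz2,
      pv_foldl_max_map_const_zero]
    simp
  | succ n ih =>
    intro F total depth
    simp only [pvGoB]
    by_cases hnil : F.flatMap (fun u => (pvGetKey t u).getD []) = []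
    · -- the next frontier is empty: every member of F has no children, both sides stall
      have hch : ∀ u ∈ F, pvCh t u = [] := by
        intro u hu
        have := List.flatMap_eq_nil_iff.mp hnil u hu
        simpa [pvCh] using this
      have hA : ∀ u ∈ F, pvGoA t (n + 1) u = (0, 0) := by
        intro u hu
        have h1 := pv_goA_succ_fst t n u
        have h2 := pv_goA_succ_snd t n u
        rw [hch u hu] at h1 h2
        simp at h1 h2
        exact Prod.ext h1 h2
      have h1 : F.map (fun u => (pvGoA t (n + 1) u).1) = F.map (fun _ => (0 : Int)) :=
        List.map_congr_left (fun u hu => by rw [hA u hu])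
      have h2 : F.map (fun u => (pvGoA t (n + 1) u).2) = F.map (fun _ => (0 : Int)) :=
        List.map_congr_left (fun u hu => by rw [hA u hu])
      rw [hnil, h1, h2, pv_foldl_max_map_const_zero]
      simp
    · have hne : ¬ ((F.flatMap (fun u => (pvGetKey t u).getD [])).isEmpty = true) := by
        simpa [List.isEmpty_iff] using hnil
      rw [if_neg hne, ih]
      set nxt := F.flatMap (fun u => (pvGetKey t u).getD []) with hnxt
      have hnxtCh : nxt = F.flatMap (pvCh t) := rfl
      -- first component
      have hS : (F.map (fun u => (pvGoA t (n + 1) u).1)).sum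
          = (nxt.length : Int) + (nxt.map (fun c => (pvGoA t n c).1)).sum := by
        calc (F.map (fun u => (pvGoA t (n + 1) u).1)).sum
            = (F.map (fun u => ((pvCh t u).map (fun c => (pvGoA t n c).1 + 1)).sum)).sum := by
              simp [pv_goA_succ_fst]
          _ = ((F.flatMap (pvCh t)).map (fun c => (pvGoA t n c).1 + 1)).sum :=
              (pv_sum_flatMap _ _ _).symm
          _ = (nxt.map (fun c => (pvGoA t n c).1 + 1)).sum := by rw [← hnxtCh]
          _ = (nxt.map (fun c => (pvGoA t n c).1)).sum + nxt.length :=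
              pv_sum_map_add_one _ _
          _ = (nxt.length : Int) + (nxt.map (fun c => (pvGoA t n c).1)).sum := by ring
      -- second component
      have hM : (F.map (fun u => (pvGoA t (n + 1) u).2)).foldl max 0
          = (nxt.map (fun c => (pvGoA t n c).2)).foldl max 0 + 1 := by
        calc (F.map (fun u => (pvGoA t (n + 1) u).2)).foldl max 0
            = (F.map (fun u => ((pvCh t u).map (fun c => (pvGoA t n c).2 + 1)).foldl max 0)).foldl max 0 := by
              simp [pv_goA_succ_snd]
          _ = ((F.flatMap (pvCh t)).map (fun c => (pvGoA t n c).2 + 1)).foldl max 0 :=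
              (pv_max_flatMap _ _ _).symm
          _ = (nxt.map (fun c => (pvGoA t n c).2 + 1)).foldl max 0 := by rw [← hnxtCh]
          _ = ((nxt.map (fun c => (pvGoA t n c).2)).map (fun x => x + 1)).foldl max 0 := by
              rw [List.map_map]
              simp only [Function.comp_def]
          _ = (nxt.map (fun c => (pvGoA t n c).2)).foldl max 0 + 1 := by
              apply pv_foldl_max_succ
              · simpa using hnil
              · intro x hx
                obtain ⟨c, _, rfl⟩ := List.mem_map.mp hx
                exact pv_goA_snd_nonneg t n c
      rw [hS, hM]
      refine Prod.ext ?_ ?_ <;> simp <;> ring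

-- ===== VERDICT (by name: the statement is the Claim_ definition above) =====
theorem calculate_subordinate_info_spec : Claim_equal_calculate_subordinate_info := by
  intro t u _dom _pre
  unfold Spec_calculate_subordinate_info calculate_subordinate_info calculate_subordinate_info_alt
  cases h : pvGetKey t u with
  | none =>
    simp
    unfold pvGoA
    rw [h]
  | some ch =>
    simp only [Option.isSome_some, if_pos]
    rw [pv_goB_eq]
    have hmax : ([(pvGoA t (t.length + 1) u).2].foldl max (0 : Int))
        = (pvGoA t (t.length + 1) u).2 := by
      simp [max_eq_right (pv_goA_snd_nonneg t _ u)]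
    simp [hmax]
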